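-- pv_equiv track=rewrite | github.com/mantianwuming/work_test | work/yitu_test_4.py | cal_min_xr
-- ===== SOURCE A (Python) =====
-- def cal_xor(s):
--     xr = 0
--     for i in range(1, len(s)):
--         if s[i] != s[i-1]:
--             xr += 1
--     return xr
--
-- def cal_zero_one(s):
--     zeros = 0
--     ones = 0
--     for i in range(len(s)):
--         if s[i] == 1:
--             ones += 1
--         if s[i] == 0:
--             zeros += 1
--     if zeros >= ones:
--         return ones
--     else:
--         return zeros
--
-- def cal_min_xr(s):
--     min_xr = len(s)
--     min_s = []
--     flag = cal_zero_one(s)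
--     for i in range(len(s)):
--         x = s[:i] + s[i+1:]
--         xr = cal_xor(x)
--         if xr < min_xr:
--             min_xr = xr
--             min_s = x
--     return min_xr, min_s
-- ===== SOURCE B (Python) =====
-- def cal_min_xr(s):
--     # O(n): compute base transition count once, then adjust per deleted index in O(1).
--     n = len(s)
--     if n == 0:
--         return 0, []
--     base = 0
--     for i in range(1, n):
--         if s[i] != s[i - 1]:
--             base += 1
--     best_i = 0
--     best_xr = None
--     for i in range(n):
--         xr = base
--         if 0 < i and s[i] != s[i - 1]:
--             xr -= 1
--         if i < n - 1 and s[i] != s[i + 1]: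
--             xr -= 1
--         if 0 < i < n - 1 and s[i - 1] != s[i + 1]:
--             xr += 1
--         if best_xr is None or xr < best_xr:
--             best_i, best_xr = i, xr
--     return best_xr, s[:best_i] + s[best_i + 1:]
-- ===== Notes on version B (the rewrite author's own statement) =====
-- stated objective: faster
-- what changed: Instead of rebuilding each deletion candidate and recounting all its adjacent transitions (O(n) per index), B counts the base transitions once and adjusts it in O(1) per deleted index from the at most three affected neighbour pairs, building the result list only once at the end.
import Mathlib
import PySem

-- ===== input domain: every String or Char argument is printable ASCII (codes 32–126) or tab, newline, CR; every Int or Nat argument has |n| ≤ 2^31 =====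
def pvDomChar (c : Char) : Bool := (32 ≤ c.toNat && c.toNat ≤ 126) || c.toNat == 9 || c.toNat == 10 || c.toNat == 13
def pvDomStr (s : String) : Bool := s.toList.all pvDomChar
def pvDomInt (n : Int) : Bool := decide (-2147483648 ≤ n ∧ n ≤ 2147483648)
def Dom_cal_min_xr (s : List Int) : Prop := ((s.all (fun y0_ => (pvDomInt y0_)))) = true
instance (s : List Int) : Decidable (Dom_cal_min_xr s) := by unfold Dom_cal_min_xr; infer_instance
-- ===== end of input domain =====

-- B replaces A's recount-per-deletion (rebuild s[:i]+s[i+1:] and count its transitions for every i)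
-- by one base transition count adjusted in O(1) per index; asymptotically faster (O(n) vs O(n^2)).

-- ===== PORT A =====
def cal_xor (s : List Int) : Int :=
  (PySem.List.pyRange 1 s.length 1).foldl
    (fun xr i =>
      if PySem.List.pyGetD s i 0 ≠ PySem.List.pyGetD s (i - 1) 0 then xr + 1 else xr) 0

def cal_zero_one (s : List Int) : Int :=
  let zo := (PySem.List.pyRange 0 s.length 1).foldl
    (fun (zo : Int × Int) i =>
      let zo := if PySem.List.pyGetD s i 0 = 1 then (zo.1, zo.2 + 1) else zo
      if PySem.List.pyGetD s i 0 = 0 then (zo.1 + 1, zo.2) else zo) (0, 0)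
  if zo.1 ≥ zo.2 then zo.2 else zo.1

def cal_min_xr (s : List Int) : Int × List Int :=
  let _flag := cal_zero_one s
  (PySem.List.pyRange 0 s.length 1).foldl
    (fun (st : Int × List Int) i =>
      let x := PySem.List.slice s none (some i) ++ PySem.List.slice s (some (i + 1)) none
      let xr := cal_xor x
      if xr < st.1 then (xr, x) else st)
    ((s.length : Int), [])

-- ===== PORT B =====
def cal_min_xr_alt (s : List Int) : Int × List Int :=
  let n := s.length
  if n = 0 then (0, [])
  else
    let base : Int := (PySem.List.pyRange 1 s.length 1).foldl
      (fun xr i =>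
        if PySem.List.pyGetD s i 0 ≠ PySem.List.pyGetD s (i - 1) 0 then xr + 1 else xr) 0
    let st := (PySem.List.pyRange 0 s.length 1).foldl
      (fun (st : Int × Option Int) i =>
        let xr := base
        let xr := if 0 < i ∧ PySem.List.pyGetD s i 0 ≠ PySem.List.pyGetD s (i - 1) 0 then xr - 1 else xr
        let xr := if i < (s.length : Int) - 1 ∧ PySem.List.pyGetD s i 0 ≠ PySem.List.pyGetD s (i + 1) 0 then xr - 1 else xr
        let xr := if 0 < i ∧ i < (s.length : Int) - 1 ∧ PySem.List.pyGetD s (i - 1) 0 ≠ PySem.List.pyGetD s (i + 1) 0 then xr + 1 else xr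
        -- 'best_xr is None or xr < best_xr' == st.2.all (xr < ·)
        if st.2.all (fun w => decide (xr < w)) then (i, some xr) else st)
      (0, none)
    -- best_xr is never None here (the loop body runs at least once); .getD 0 extracts it
    (st.2.getD 0, PySem.List.slice s none (some st.1) ++ PySem.List.slice s (some (st.1 + 1)) none)

-- ===== PRECONDITION & SPEC =====
def Spec_cal_min_xr (s : List Int) (out : Int × List Int) : Prop := out = cal_min_xr_alt s
instance (s : List Int) (out : Int × List Int) : Decidable (Spec_cal_min_xr s out) := by unfold Spec_cal_min_xr; infer_instance

-- ===== CLAIM (what is proved, stated in full; the proofs are below) =====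
def Claim_equal_cal_min_xr : Prop := ∀ (s : List Int), Dom_cal_min_xr s → Spec_cal_min_xr s (cal_min_xr s)

-- ===== LEMMAS AND PROOFS =====

-- structural adjacent-transition count
def pvTrans : List Int → Int
  | [] => 0
  | [_] => 0
  | a :: b :: t => (if a = b then 0 else 1) + pvTrans (b :: t)

-- deletion of index i (the expression both ports build)
def rmf (s : List Int) (i : Int) : List Int :=
  PySem.List.slice s none (some i) ++ PySem.List.slice s (some (i + 1)) none

lemma foldl_count_shift (c : Nat → Prop) [DecidablePred c] :
    ∀ (ks : List Nat) (init : Int),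
      ks.foldl (fun xr k => if c k then xr + 1 else xr) init
        = init + ks.foldl (fun xr k => if c k then xr + 1 else xr) 0 := by
  intro ks
  induction ks with
  | nil => intro init; simp
  | cons k ks ih =>
    intro init
    simp only [List.foldl_cons]
    rw [ih, ih (if c k then (0:Int) + 1 else 0)]
    split_ifs <;> omega

lemma F_eq_trans : ∀ (s : List Int),
    (List.range (s.length - 1)).foldl
      (fun xr k => if s.getD (k + 1) 0 ≠ s.getD k 0 then xr + 1 else xr) (0 : Int) = pvTrans s := by
  intro s
  induction s with
  | nil => simp [pvTrans]
  | cons a t ih =>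
    cases t with
    | nil => simp [pvTrans]
    | cons b t' =>
      have hlen : (a :: b :: t').length - 1 = t'.length + 1 := by simp
      rw [hlen, List.range_succ_eq_map, List.foldl_cons, List.foldl_map]
      simp only [List.getD_cons_succ, List.getD_cons_zero, Nat.succ_eq_add_one, zero_add]
      rw [foldl_count_shift (fun k => t'.getD k 0 ≠ (b :: t').getD k 0)]
      have hlen2 : (b :: t').length - 1 = t'.length := by simp
      rw [hlen2] at ih
      simp only [List.getD_cons_succ] at ih
      rw [ih]
      simp only [pvTrans]
      split_ifs <;> omega

lemma cal_xor_eq_trans (s : List Int) : cal_xor s = pvTrans s := by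
  unfold cal_xor
  rw [PySem.List.pyRange_one, List.foldl_map]
  have hn : ((s.length : Int) - 1).toNat = s.length - 1 := by omega
  rw [hn]
  rw [show (fun (xr : Int) (k : Nat) =>
        if PySem.List.pyGetD s (1 + (k : Int)) 0 ≠ PySem.List.pyGetD s (1 + (k : Int) - 1) 0 then xr + 1 else xr)
      = (fun (xr : Int) (k : Nat) => if s.getD (k + 1) 0 ≠ s.getD k 0 then xr + 1 else xr) from ?_]
  · exact F_eq_trans s
  · funext xr k
    have h1 : (1 : Int) + (k : Int) = ((k + 1 : Nat) : Int) := by push_cast; ring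
    have h2 : (1 : Int) + (k : Int) - 1 = ((k : Nat) : Int) := by omega
    rw [h2, h1, PySem.List.pyGetD_natCast, PySem.List.pyGetD_natCast]

lemma trans_le_len (l : List Int) : pvTrans l ≤ (l.length : Int) := by
  induction l with
  | nil => simp [pvTrans]
  | cons a t ih =>
    cases t with
    | nil => simp [pvTrans]
    | cons b t' =>
      simp only [pvTrans, List.length_cons] at *
      split_ifs <;> push_cast <;> omega

lemma trans_removeAt : ∀ (s : List Int) (j : Nat), j < s.length →
    pvTrans (s.take j ++ s.drop (j + 1)) =
      pvTrans s
        - (if 0 < j ∧ s.getD j 0 ≠ s.getD (j - 1) 0 then 1 else 0)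
        - (if j + 1 < s.length ∧ s.getD j 0 ≠ s.getD (j + 1) 0 then 1 else 0)
        + (if 0 < j ∧ j + 1 < s.length ∧ s.getD (j - 1) 0 ≠ s.getD (j + 1) 0 then 1 else 0) := by
  intro s
  induction s with
  | nil => intro j h; simp at h
  | cons a t ih =>
    intro j hj
    cases j with
    | zero =>
      simp only [List.take_zero, List.nil_append, List.drop_succ_cons, List.drop_zero]
      cases t with
      | nil => simp [pvTrans]
      | cons b t' =>
        simp only [pvTrans, List.getD_cons_zero, List.getD_cons_succ, List.length_cons]
        split_ifs <;> omega
    | succ jj =>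
      cases t with
      | nil => simp at hj
      | cons b t' =>
        cases jj with
        | zero =>
          cases t' with
          | nil =>
            simp [pvTrans]
            split_ifs <;> omega
          | cons c t'' =>
            simp only [List.take_succ_cons, List.take_zero, List.drop_succ_cons, List.drop_zero,
              List.nil_append, List.cons_append, pvTrans, List.getD_cons_zero, List.getD_cons_succ,
              List.length_cons, Nat.add_sub_cancel]
            split_ifs <;> omega
        | succ m =>
          have hlt : m + 1 < (b :: t').length := by
            simp only [List.length_cons] at hj ⊢; omega
          have IH := ih (m + 1) hlt
          simp only [List.take_succ_cons, List.drop_succ_cons, List.cons_append] at IH ⊢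
          simp only [pvTrans, List.getD_cons_succ, List.length_cons,
            Nat.add_sub_cancel] at IH ⊢
          split_ifs at IH ⊢ <;> omega

lemma rmf_eq (s : List Int) (i : Int) (h0 : 0 ≤ i) :
    rmf s i = s.take i.toNat ++ s.drop (i.toNat + 1) := by
  unfold rmf
  rw [PySem.List.slice_to (xs := s) h0, PySem.List.slice_from (xs := s) (a := i + 1) (by omega)]
  have : (i + 1).toNat = i.toNat + 1 := by omega
  rw [this]

-- B's O(1) adjusted value equals A's recount for the deleted index
lemma pointwise (s : List Int) (i : Int) (h0 : 0 ≤ i) (hn : i < (s.length : Int)) :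
    (let xr := cal_xor s
     let xr := if 0 < i ∧ PySem.List.pyGetD s i 0 ≠ PySem.List.pyGetD s (i - 1) 0 then xr - 1 else xr
     let xr := if i < (s.length : Int) - 1 ∧ PySem.List.pyGetD s i 0 ≠ PySem.List.pyGetD s (i + 1) 0 then xr - 1 else xr
     if 0 < i ∧ i < (s.length : Int) - 1 ∧ PySem.List.pyGetD s (i - 1) 0 ≠ PySem.List.pyGetD s (i + 1) 0 then xr + 1 else xr)
      = cal_xor (rmf s i) := by
  have hj : i.toNat < s.length := by omega
  rw [rmf_eq s i h0, cal_xor_eq_trans, cal_xor_eq_trans, trans_removeAt s i.toNat hj]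
  have e0 : PySem.List.pyGetD s i 0 = s.getD i.toNat 0 := by
    rw [show i = ((i.toNat : Nat) : Int) by omega, PySem.List.pyGetD_natCast, Int.toNat_natCast]
  have e2 : PySem.List.pyGetD s (i + 1) 0 = s.getD (i.toNat + 1) 0 := by
    rw [show i + 1 = ((i.toNat + 1 : Nat) : Int) by omega, PySem.List.pyGetD_natCast]
  by_cases h1 : 0 < i
  · have e1 : PySem.List.pyGetD s (i - 1) 0 = s.getD (i.toNat - 1) 0 := by
      rw [show i - 1 = ((i.toNat - 1 : Nat) : Int) by omega, PySem.List.pyGetD_natCast]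
    simp only [e0, e1, e2]
    split_ifs <;> omega
  · have hz : i = 0 := by omega
    subst hz
    simp only [e0, e2]
    split_ifs <;> omega

lemma couple (g : Int → Int) (rmf' : Int → List Int) :
    ∀ (ks : List Int) (v b : Int),
      ks.foldl (fun (st : Int × List Int) i => if g i < st.1 then (g i, rmf' i) else st) (v, rmf' b)
        = (fun (st : Int × Option Int) => (st.2.getD 0, rmf' st.1))
            (ks.foldl
              (fun (st : Int × Option Int) i =>
                if st.2.all (fun w => decide (g i < w)) then (i, some (g i)) else st)
              (b, some v)) := by
  intro ks
  induction ks with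
  | nil => intro v b; simp
  | cons i ks ih =>
    intro v b
    simp only [List.foldl_cons, Option.all_some, decide_eq_true_eq]
    by_cases h : g i < v
    · simp only [if_pos h]
      exact ih (g i) i
    · simp only [if_neg h]
      exact ih v b

-- ===== VERDICT (by name: the statement is the Claim_ definition above) =====
theorem cal_min_xr_spec : Claim_equal_cal_min_xr := by
  intro s _hdom
  unfold Spec_cal_min_xr
  by_cases hs : s.length = 0
  · have h0 : s = [] := List.eq_nil_of_length_eq_zero hs
    subst h0
    decide
  · have hpos : 0 < s.length := Nat.pos_of_ne_zero hs
    have hcons := PySem.List.pyRange_one_cons (a := 0) (b := (s.length : Int))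
      (by exact_mod_cast hpos)
    unfold cal_min_xr cal_min_xr_alt
    rw [if_neg hs]
    have hbase : (PySem.List.pyRange 1 s.length 1).foldl
        (fun xr i =>
          if PySem.List.pyGetD s i 0 ≠ PySem.List.pyGetD s (i - 1) 0 then xr + 1 else xr) 0
        = cal_xor s := rfl
    dsimp only
    rw [hbase]
    have hcong : (PySem.List.pyRange 0 (s.length : Int) 1).foldl
        (fun (st : Int × Option Int) i =>
          let xr := cal_xor s
          let xr := if 0 < i ∧ PySem.List.pyGetD s i 0 ≠ PySem.List.pyGetD s (i - 1) 0 then xr - 1 else xr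
          let xr := if i < (s.length : Int) - 1 ∧ PySem.List.pyGetD s i 0 ≠ PySem.List.pyGetD s (i + 1) 0 then xr - 1 else xr
          let xr := if 0 < i ∧ i < (s.length : Int) - 1 ∧ PySem.List.pyGetD s (i - 1) 0 ≠ PySem.List.pyGetD s (i + 1) 0 then xr + 1 else xr
          if st.2.all (fun w => decide (xr < w)) then (i, some xr) else st)
        (0, none)
        = (PySem.List.pyRange 0 (s.length : Int) 1).foldl
        (fun (st : Int × Option Int) i =>
          if st.2.all (fun w => decide (cal_xor (PySem.List.slice s none (some i) ++ PySem.List.slice s (some (i + 1)) none) < w))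
            then (i, some (cal_xor (PySem.List.slice s none (some i) ++ PySem.List.slice s (some (i + 1)) none)))
            else st)
        (0, none) := by
      apply PySem.List.foldl_congr_mem
      intro acc i hi
      have hmem := (PySem.List.mem_pyRange_one (a := 0) (b := (s.length : Int)) (x := i)).mp hi
      have hp := pointwise s i (by omega) (by omega)
      have hslice : rmf s i
          = PySem.List.slice s none (some i) ++ PySem.List.slice s (some (i + 1)) none := rfl
      rw [hslice] at hp
      dsimp only at hp
      obtain ⟨b, o⟩ := acc
      simp only [hp]
    dsimp only at hcong
    rw [hcong]
    norm_num at hcons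
    rw [hcons]
    simp only [List.foldl_cons, Option.all_none, if_true]
    have hx0 : cal_xor (PySem.List.slice s none (some 0) ++ PySem.List.slice s (some (0 + 1)) none)
        < (s.length : Int) := by
      show cal_xor (rmf s 0) < (s.length : Int)
      have h1 : rmf s 0 = s.take (0 : Int).toNat ++ s.drop ((0 : Int).toNat + 1) := rmf_eq s 0 le_rfl
      rw [h1, cal_xor_eq_trans]
      have h2 := trans_le_len (s.take (0 : Int).toNat ++ s.drop ((0 : Int).toNat + 1))
      have h3 : (s.take (0 : Int).toNat ++ s.drop ((0 : Int).toNat + 1)).length = s.length - 1 := by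
        simp
      rw [h3] at h2
      omega
    rw [if_pos hx0]
    exact couple
      (fun i => cal_xor (PySem.List.slice s none (some i) ++ PySem.List.slice s (some (i + 1)) none))
      (fun i => PySem.List.slice s none (some i) ++ PySem.List.slice s (some (i + 1)) none)
      (PySem.List.pyRange 1 (s.length : Int) 1)
      (cal_xor (PySem.List.slice s none (some 0) ++ PySem.List.slice s (some (0 + 1)) none)) 0
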